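-- pv_equiv track=rewrite | github.com/gabriellaec/desoft-analise-exercicios | backup/user_333/ch130_2020_04_01_17_15_24_414170.py | monta_mala
-- ===== SOURCE A (Python) =====
-- def monta_mala(lista_de_pesos):
--     i=0
--     peso_total=0 #variavel que guarda o encremento do peso das malas despachadas
--     lista_de_despache=[] #lista de malas que seram despachadas
--     while i<len(lista_de_pesos):
--         peso_total+=lista_de_pesos[i]
--         if peso_total<=23:
--             lista_de_despache.append(lista_de_pesos[i])
--         else:
--             break
--         i+=1
--     return lista_de_despache
-- ===== SOURCE B (Python) =====
-- from itertools import accumulate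
--
-- def monta_mala(lista_de_pesos):
--     sums = list(accumulate(lista_de_pesos))
--     cutoff = next((i for i, s in enumerate(sums) if s > 23), len(lista_de_pesos))
--     return lista_de_pesos[:cutoff]
-- ===== Notes on version B (the rewrite author's own statement) =====
-- stated objective: idiomatic
-- what changed: Replaced the index-driven accumulate-and-append while loop with a precomputed prefix-sum table (itertools.accumulate), a find of the first index whose running sum exceeds 23, and one bulk slice.
import Mathlib
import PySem

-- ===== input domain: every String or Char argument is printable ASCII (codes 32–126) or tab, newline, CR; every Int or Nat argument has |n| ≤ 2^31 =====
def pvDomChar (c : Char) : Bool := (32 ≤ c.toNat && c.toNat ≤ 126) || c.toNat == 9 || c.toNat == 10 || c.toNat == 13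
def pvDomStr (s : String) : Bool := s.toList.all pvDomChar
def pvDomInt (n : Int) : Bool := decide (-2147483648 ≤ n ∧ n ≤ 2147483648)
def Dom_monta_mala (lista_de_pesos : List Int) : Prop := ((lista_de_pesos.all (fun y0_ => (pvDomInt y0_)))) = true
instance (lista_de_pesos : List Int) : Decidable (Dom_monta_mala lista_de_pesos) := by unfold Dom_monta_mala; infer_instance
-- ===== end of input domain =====

-- B replaces A's accumulate-and-append while loop by a prefix-sum table, a first-index find and a bulk slice (idiomatic decomposition; same cost).


-- ===== PORT A =====
-- A's while loop: index i, running total peso_total, accumulator lista_de_despache;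
-- break when the running total exceeds 23.
def montaMalaLoop (lista_de_pesos : List Int) (peso_total : Int) : List Int :=
  match lista_de_pesos with
  | [] => []
  | x :: rest =>
    if peso_total + x ≤ 23 then x :: montaMalaLoop rest (peso_total + x)
    else []

def monta_mala (lista_de_pesos : List Int) : List Int :=
  montaMalaLoop lista_de_pesos 0

-- ===== PORT B =====
-- prefix sums (itertools.accumulate)
def pvAccumulate (acc : Int) : List Int → List Int
  | [] => []
  | x :: rest => (acc + x) :: pvAccumulate (acc + x) rest

def monta_mala_alt (lista_de_pesos : List Int) : List Int :=
  let sums := pvAccumulate 0 lista_de_pesos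
  let cutoff := (sums.findIdx? (fun s => decide (23 < s))).getD lista_de_pesos.length
  lista_de_pesos.take cutoff

-- ===== PRECONDITION & SPEC =====
def Spec_monta_mala (lista_de_pesos : List Int) (out : List Int) : Prop := out = monta_mala_alt lista_de_pesos
instance (lista_de_pesos : List Int) (out : List Int) : Decidable (Spec_monta_mala lista_de_pesos out) := by unfold Spec_monta_mala; infer_instance

-- ===== CLAIM (what is proved, stated in full; the proofs are below) =====
def Claim_equal_monta_mala : Prop := ∀ (lista_de_pesos : List Int), Dom_monta_mala lista_de_pesos → Spec_monta_mala lista_de_pesos (monta_mala lista_de_pesos)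

-- ===== LEMMAS AND PROOFS =====
theorem montaMalaLoop_eq_take (lista_de_pesos : List Int) :
    ∀ acc : Int, montaMalaLoop lista_de_pesos acc =
      lista_de_pesos.take
        (((pvAccumulate acc lista_de_pesos).findIdx? (fun s => decide (23 < s))).getD
          lista_de_pesos.length) := by
  induction lista_de_pesos with
  | nil => intro acc; rfl
  | cons x rest ih =>
    intro acc
    simp only [montaMalaLoop, pvAccumulate, List.findIdx?_cons, List.length_cons]
    by_cases h : acc + x ≤ 23
    · have hp : (decide (23 < acc + x)) = false := by simp; omega
      rw [hp]
      simp only [Bool.false_eq_true, if_false]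
      rw [ih (acc + x)]
      cases hfind : (pvAccumulate (acc + x) rest).findIdx? (fun s => decide (23 < s)) with
      | none => simp; omega
      | some k => simp; omega
    · have hp : (decide (23 < acc + x)) = true := by simp; omega
      rw [hp]
      simp
      omega

-- ===== VERDICT (by name: the statement is the Claim_ definition above) =====
theorem monta_mala_spec : Claim_equal_monta_mala := by
  intro l _hd
  unfold Spec_monta_mala monta_mala monta_mala_alt
  exact montaMalaLoop_eq_take l 0
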